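-- pv_equiv track=rewrite | github.com/jpkinca/ai_advancements | populate_ai_historical_data.py | _get_symbol_priority
-- ===== SOURCE A (Python) =====
-- def _get_symbol_priority(symbol: str) -> int:
--     """Get priority level for symbol (1=highest, 5=lowest)"""
--     priority_groups = {
--         1: ['NVDA', 'AAPL', 'MSFT', 'GOOGL', 'AMZN', 'TSLA', 'META'],
--         2: ['ACM', 'ADSK', 'AEIS', 'AEM', 'AFRM'],
--         3: ['PLTR', 'HOOD', 'RKLB', 'IREN', 'ANET', 'AMD', 'INTC', 'NFLX', 'CRM', 'ORCL', 'AVGO', 'QCOM'],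
--         4: ['SHOP', 'DDOG', 'SNOW', 'CRWD', 'ZS', 'OKTA', 'TWLO', 'NET', 'CFLT', 'ESTC', 'SPLK', 'MDB', 'TEAM', 'WDAY'],
--         5: ['SPY', 'QQQ', 'XLK', 'ARKK', 'ROBO']
--     }
--
--     for priority, symbols in priority_groups.items():
--         if symbol in symbols:
--             return priority
--     return 5  # Default to lowest priority
-- ===== SOURCE B (Python) =====
-- _PRIORITY_TABLE = {
--     'NVDA': 1, 'AAPL': 1, 'MSFT': 1, 'GOOGL': 1, 'AMZN': 1, 'TSLA': 1, 'META': 1,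
--     'ACM': 2, 'ADSK': 2, 'AEIS': 2, 'AEM': 2, 'AFRM': 2,
--     'PLTR': 3, 'HOOD': 3, 'RKLB': 3, 'IREN': 3, 'ANET': 3, 'AMD': 3, 'INTC': 3,
--     'NFLX': 3, 'CRM': 3, 'ORCL': 3, 'AVGO': 3, 'QCOM': 3,
--     'SHOP': 4, 'DDOG': 4, 'SNOW': 4, 'CRWD': 4, 'ZS': 4, 'OKTA': 4, 'TWLO': 4,
--     'NET': 4, 'CFLT': 4, 'ESTC': 4, 'SPLK': 4, 'MDB': 4, 'TEAM': 4, 'WDAY': 4,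
--     'SPY': 5, 'QQQ': 5, 'XLK': 5, 'ARKK': 5, 'ROBO': 5,
-- }
--
-- def _get_symbol_priority(symbol: str) -> int:
--     """Get priority level for symbol (1=highest, 5=lowest)"""
--     return _PRIORITY_TABLE.get(symbol, 5)
-- ===== Notes on version B (the rewrite author's own statement) =====
-- stated objective: simpler
-- what changed: Replaced the loop over a dict of per-priority lists (with a linear membership scan per group) by one flat symbol-to-priority dict and a single table.get(symbol, 5) lookup.
import Mathlib
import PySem

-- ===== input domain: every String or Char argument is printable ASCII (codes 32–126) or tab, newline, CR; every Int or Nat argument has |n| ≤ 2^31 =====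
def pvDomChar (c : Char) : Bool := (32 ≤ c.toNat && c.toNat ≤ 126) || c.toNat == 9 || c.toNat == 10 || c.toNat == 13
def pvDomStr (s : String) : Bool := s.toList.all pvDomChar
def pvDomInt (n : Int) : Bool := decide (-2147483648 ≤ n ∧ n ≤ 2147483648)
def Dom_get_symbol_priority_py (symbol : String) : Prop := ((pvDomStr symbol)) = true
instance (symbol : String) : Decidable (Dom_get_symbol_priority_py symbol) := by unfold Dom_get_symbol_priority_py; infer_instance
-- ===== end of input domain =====

-- B replaces A's loop over a dict of per-priority lists by one flat symbol→priority dict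
-- and a single .get(symbol, 5) lookup (objective: simpler).

-- ===== PORT A =====
-- A's priority_groups dict: priorities in insertion order with their symbol lists.
def pvGroupsA : List (Int × List String) := [
  (1, ["NVDA", "AAPL", "MSFT", "GOOGL", "AMZN", "TSLA", "META"]),
  (2, ["ACM", "ADSK", "AEIS", "AEM", "AFRM"]),
  (3, ["PLTR", "HOOD", "RKLB", "IREN", "ANET", "AMD", "INTC", "NFLX", "CRM", "ORCL", "AVGO", "QCOM"]),
  (4, ["SHOP", "DDOG", "SNOW", "CRWD", "ZS", "OKTA", "TWLO", "NET", "CFLT", "ESTC", "SPLK", "MDB", "TEAM", "WDAY"]),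
  (5, ["SPY", "QQQ", "XLK", "ARKK", "ROBO"])]

-- the for-loop with early return: first group containing the symbol wins, else 5
def pvScanA (symbol : String) : List (Int × List String) → Int
  | [] => 5
  | (priority, symbols) :: rest =>
      if symbols.contains symbol then priority else pvScanA symbol rest

def get_symbol_priority_py (symbol : String) : Int := pvScanA symbol pvGroupsA

-- ===== PORT B =====
-- B's flat literal dict mapping each symbol directly to its priority.
def pvTableB : PySem.Dict String Int := PySem.Dict.ofList [
  ("NVDA", 1), ("AAPL", 1), ("MSFT", 1), ("GOOGL", 1), ("AMZN", 1), ("TSLA", 1), ("META", 1),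
  ("ACM", 2), ("ADSK", 2), ("AEIS", 2), ("AEM", 2), ("AFRM", 2),
  ("PLTR", 3), ("HOOD", 3), ("RKLB", 3), ("IREN", 3), ("ANET", 3), ("AMD", 3), ("INTC", 3), ("NFLX", 3), ("CRM", 3), ("ORCL", 3), ("AVGO", 3), ("QCOM", 3),
  ("SHOP", 4), ("DDOG", 4), ("SNOW", 4), ("CRWD", 4), ("ZS", 4), ("OKTA", 4), ("TWLO", 4), ("NET", 4), ("CFLT", 4), ("ESTC", 4), ("SPLK", 4), ("MDB", 4), ("TEAM", 4), ("WDAY", 4),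
  ("SPY", 5), ("QQQ", 5), ("XLK", 5), ("ARKK", 5), ("ROBO", 5)]

def get_symbol_priority_py_alt (symbol : String) : Int := pvTableB.getD symbol 5

-- ===== PRECONDITION & SPEC =====
def Spec_get_symbol_priority_py (symbol : String) (out : Int) : Prop := out = get_symbol_priority_py_alt symbol
instance (symbol : String) (out : Int) : Decidable (Spec_get_symbol_priority_py symbol out) := by unfold Spec_get_symbol_priority_py; infer_instance

-- ===== CLAIM (what is proved, stated in full; the proofs are below) =====
def Claim_equal_get_symbol_priority_py : Prop := ∀ (symbol : String), Dom_get_symbol_priority_py symbol → Spec_get_symbol_priority_py symbol (get_symbol_priority_py symbol)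

-- ===== LEMMAS AND PROOFS =====

-- flattening A's groups into a flat association list
def pvFlat (groups : List (Int × List String)) : List (String × Int) :=
  groups.flatMap fun g => g.2.map (fun x => (x, g.1))

-- lookup in a prefix of pairs all carrying the same priority
theorem pv_get_map_prefix (p : Int) (s : String) :
    ∀ (syms : List String) (rest : List (String × Int)),
      ((PySem.Dict.mk (syms.map (fun x => (x, p)) ++ rest)).get? s).getD 5
        = if syms.contains s then p else ((PySem.Dict.mk rest).get? s).getD 5 := by
  intro syms
  induction syms with
  | nil => intro rest; simp
  | cons x xs ih =>
      intro rest
      simp only [List.map_cons, List.cons_append, PySem.Dict.get?_mk_cons, List.contains_cons]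
      by_cases hx : s = x
      · subst hx; simp
      · have hx' : (x == s) = false := by simp [Ne.symm hx]
        simp [hx', hx, ih rest]

-- A's scan equals lookup in the flattened table
theorem pv_scan_eq_flat (s : String) :
    ∀ (groups : List (Int × List String)),
      pvScanA s groups = ((PySem.Dict.mk (pvFlat groups)).get? s).getD 5 := by
  intro groups
  induction groups with
  | nil => simp [pvScanA, pvFlat, PySem.Dict.get?]
  | cons g gs ih =>
      obtain ⟨p, syms⟩ := g
      simp only [pvScanA, pvFlat, List.flatMap_cons]
      rw [pv_get_map_prefix p s syms]
      by_cases h : syms.contains s <;> simp [h, ih, pvFlat]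

-- B's literal dict (distinct keys) is exactly the flat list of A's groups
set_option maxRecDepth 10000 in
theorem pv_table_eq : pvTableB = PySem.Dict.mk (pvFlat pvGroupsA) := by decide

-- ===== VERDICT (by name: the statement is the Claim_ definition above) =====
theorem get_symbol_priority_py_spec : Claim_equal_get_symbol_priority_py := by
  intro symbol _
  unfold Spec_get_symbol_priority_py get_symbol_priority_py get_symbol_priority_py_alt
  rw [pv_table_eq, PySem.Dict.getD_eq_get?_getD]
  exact pv_scan_eq_flat symbol pvGroupsA
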